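-- pv_equiv track=rewrite | github.com/paulinapp1/pp1-rozwiazania | testpp1/zad49_4.py | f
-- ===== SOURCE A (Python) =====
-- def f(dice):
--     max_count = 0  # Variable to store the maximum consecutive count
--     current_count = 1  # Initialize the count for the first digit
--     max_digit = None  # Variable to store the digit with the maximum consecutive count
--
--     # Iterate through the sequence starting from the second digit
--     for i in range(1, len(dice)):
--         # Check if the current digit is the same as the previous one
--         if dice[i] == dice[i - 1]:
--             current_count += 1  # Increment the consecutive count if it's the same digit
--         else:
--             # If the count for the current digit is greater than the maximum count so far
--             if current_count > max_count:
--                 max_count = current_count  # Update the maximum count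
--                 max_digit = dice[i - 1]  # Update the digit with the maximum count
--             current_count = 1  # Reset the count for a new digit
--
--     # Check for the count of the last digit sequence
--     if current_count > max_count:
--         max_count = current_count
--         max_digit = dice[-1]
--
--     return int(max_digit)
-- ===== SOURCE B (Python) =====
-- def f(dice):
--     # Stage 1: run-length encode the sequence into (digit, run_length) pairs.
--     runs = []
--     for d in dice:
--         if runs and runs[-1][0] == d:
--             runs[-1][1] += 1
--         else:
--             runs.append([d, 1])
--     # Stage 2: pick the digit of the longest run (strict '>' keeps the earliest).
--     best_len = 0
--     best = None
--     for d, n in runs: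
--         if n > best_len:
--             best_len = n
--             best = d
--     return int(best)
-- ===== Notes on version B (the rewrite author's own statement) =====
-- stated objective: alternative
-- what changed: replaces A's interleaved max/current-count bookkeeping with trailing-run patch-up by a staged pipeline: first run-length encode the list into (digit, length) pairs, then scan those runs for the longest one
import Mathlib
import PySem

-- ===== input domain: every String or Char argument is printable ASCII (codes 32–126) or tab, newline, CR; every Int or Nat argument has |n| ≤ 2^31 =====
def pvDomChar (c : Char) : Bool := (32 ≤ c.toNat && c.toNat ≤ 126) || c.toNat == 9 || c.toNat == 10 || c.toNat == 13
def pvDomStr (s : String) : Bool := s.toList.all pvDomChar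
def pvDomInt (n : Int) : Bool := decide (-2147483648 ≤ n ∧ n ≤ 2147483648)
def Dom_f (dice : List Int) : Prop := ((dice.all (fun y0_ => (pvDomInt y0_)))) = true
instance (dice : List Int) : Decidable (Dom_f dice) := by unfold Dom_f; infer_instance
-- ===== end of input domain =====

-- B replaces A's interleaved max/current-count bookkeeping (plus the trailing-run patch-up)
-- by a staged pipeline: run-length encode the list, then scan the runs for the longest.

-- ===== PORT A =====
-- loop body of A's 'for i in range(1, len(dice))' over state (max_count, current_count, max_digit)
def fStepA (dice : List Int) (s : Int × Int × Option Int) (i : Int) : Int × Int × Option Int :=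
  let (mc, cc, md) := s
  if PySem.List.pyGetD dice i 0 = PySem.List.pyGetD dice (i - 1) 0 then (mc, cc + 1, md)
  else if cc > mc then (cc, 1, some (PySem.List.pyGetD dice (i - 1) 0))
  else (mc, 1, md)

def f (dice : List Int) : Int :=
  let s := (PySem.List.pyRange 1 (dice.length : Int) 1).foldl (fStepA dice) (0, 1, none)
  let md := if s.2.1 > s.1 then some (PySem.List.pyGetD dice (-1) 0) else s.2.2
  -- int(None) raises only on the empty input, which Pre_f excludes
  md.getD 0

-- ===== PORT B =====
-- body of B's first loop: extend the last run in 'runs' or start a new one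
def addToRuns (runs : List (Int × Int)) (d : Int) : List (Int × Int) :=
  match runs.getLast? with
  | some p => if p.1 = d then runs.dropLast ++ [(p.1, p.2 + 1)] else runs ++ [(d, 1)]
  | none => runs ++ [(d, 1)]

-- body of B's second loop over state (best_len, best)
def bestStep (s : Int × Option Int) (p : Int × Int) : Int × Option Int :=
  if p.2 > s.1 then (p.2, some p.1) else s

def f_alt (dice : List Int) : Int :=
  let runs := dice.foldl addToRuns []
  let s := runs.foldl bestStep (0, none)
  -- int(None) raises only on the empty input, which Pre_f excludes
  s.2.getD 0

-- ===== PRECONDITION & SPEC =====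
-- Pre_f excludes only the empty list, on which A raises IndexError (dice[-1]).
def Pre_f (dice : List Int) : Prop := dice ≠ []
instance (dice : List Int) : Decidable (Pre_f dice) := by unfold Pre_f; infer_instance
def pvWitness_f : List Int := ([1, 1, 2])

def Spec_f (dice : List Int) (out : Int) : Prop := out = f_alt dice
instance (dice : List Int) (out : Int) : Decidable (Spec_f dice out) := by unfold Spec_f; infer_instance

-- ===== CLAIM (what is proved, stated in full; the proofs are below) =====
def Claim_equal_f : Prop := ∀ (dice : List Int), Dom_f dice → Pre_f dice → Spec_f dice (f dice)

-- ===== LEMMAS AND PROOFS =====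

-- A's loop body as a function of (previous element, current element)
def stepPair (s : Int × Int × Option Int) (p y : Int) : Int × Int × Option Int :=
  let (mc, cc, md) := s
  if y = p then (mc, cc + 1, md)
  else if cc > mc then (cc, 1, some p) else (mc, 1, md)

-- A's loop re-expressed as a walk along the list carrying the previous element
def pairLoop (p : Int) : List Int → (Int × Int × Option Int) → Int × Int × Option Int
  | [], s => s
  | y :: ys, s => pairLoop y ys (stepPair s p y)

-- recursive run-length encoding: runsAux d n ys = runs of (d^n ++ ys) with the first run open
def runsAux (d : Int) (n : Int) : List Int → List (Int × Int)
  | [] => [(d, n)]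
  | x :: xs => if x = d then runsAux d (n + 1) xs else (d, n) :: runsAux x 1 xs

theorem fStepA_eq_stepPair (dice : List Int) (s : Int × Int × Option Int) (i : Int) :
    fStepA dice s i = stepPair s (PySem.List.pyGetD dice (i - 1) 0) (PySem.List.pyGetD dice i 0) := by
  rcases s with ⟨mc, cc, md⟩; rfl

-- A's index-based fold from index a equals the pair walk over the suffix
theorem suffixA : ∀ (k : Nat) (dice : List Int) (a : Nat) (s : Int × Int × Option Int),
    1 ≤ a → a + k = dice.length →
    (PySem.List.pyRange (a : Int) (dice.length : Int) 1).foldl (fStepA dice) s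
      = pairLoop (dice.getD (a - 1) 0) (dice.drop a) s := by
  intro k
  induction k with
  | zero =>
    intro dice a s ha hlen
    rw [PySem.List.pyRange_one_eq_nil (by omega), List.drop_of_length_le (by omega)]
    rfl
  | succ k ih =>
    intro dice a s ha hlen
    have hlt : a < dice.length := by omega
    rw [PySem.List.pyRange_one_cons (by exact_mod_cast hlt)]
    simp only [List.foldl_cons]
    rw [fStepA_eq_stepPair]
    have hc1 : ((a : Int) - 1) = ((a - 1 : Nat) : Int) := by omega
    have hc2 : ((a : Int) + 1) = ((a + 1 : Nat) : Int) := by push_cast; ring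
    rw [hc1, hc2, PySem.List.pyGetD_natCast, PySem.List.pyGetD_natCast]
    rw [List.drop_eq_getElem_cons hlt]
    have hgd : dice.getD a 0 = dice[a] := List.getD_eq_getElem dice 0 hlt
    rw [show pairLoop (dice.getD (a-1) 0) (dice[a] :: dice.drop (a+1)) s
          = pairLoop dice[a] (dice.drop (a+1)) (stepPair s (dice.getD (a-1) 0) dice[a]) from rfl]
    rw [ih dice (a + 1) _ (by omega) (by omega)]
    simp [List.getElem?_eq_getElem hlt]

-- B's first loop equals the recursive run-length encoding
theorem foldl_addToRuns : ∀ (ys : List Int) (rs : List (Int × Int)) (d n : Int),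
    ys.foldl addToRuns (rs ++ [(d, n)]) = rs ++ runsAux d n ys := by
  intro ys
  induction ys with
  | nil => intro rs d n; simp [runsAux]
  | cons x xs ih =>
    intro rs d n
    simp only [List.foldl_cons]
    by_cases hx : x = d
    · subst hx
      rw [show addToRuns (rs ++ [(x, n)]) x = rs ++ [(x, n + 1)] from by
        simp [addToRuns]]
      rw [ih rs x (n + 1)]
      simp [runsAux]
    · rw [show addToRuns (rs ++ [(d, n)]) x = (rs ++ [(d, n)]) ++ [(x, 1)] from by
        simp [addToRuns, (Ne.symm hx : d ≠ x)]]
      rw [ih (rs ++ [(d, n)]) x 1]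
      simp [runsAux, hx]

-- the default value of getLastD is irrelevant on a nonempty list
theorem getLastD_irrel (x : Int) (xs : List Int) (d e : Int) :
    (x :: xs).getLastD d = (x :: xs).getLastD e := by
  rw [List.getLastD_eq_getLast?, List.getLastD_eq_getLast?,
      List.getLast?_eq_some_getLast (l := x :: xs) (List.cons_ne_nil x xs)]
  rfl

-- the core invariant: A's pair walk + trailing-run check equals B's best-run scan over the runs
theorem mainLemma : ∀ (ys : List Int) (d mc cc : Int) (md : Option Int),
    (if (pairLoop d ys (mc, cc, md)).2.1 > (pairLoop d ys (mc, cc, md)).1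
     then some ((d :: ys).getLastD 0) else (pairLoop d ys (mc, cc, md)).2.2)
      = ((runsAux d cc ys).foldl bestStep (mc, md)).2 := by
  intro ys
  induction ys with
  | nil =>
    intro d mc cc md
    simp only [pairLoop, runsAux, List.foldl_cons, List.foldl_nil, bestStep]
    by_cases h : cc > mc <;> simp [h]
  | cons x xs ih =>
    intro d mc cc md
    by_cases hx : x = d
    · simp only [pairLoop, stepPair, runsAux, hx, if_true]
      have := ih d mc (cc + 1) md
      simpa [List.getLastD_cons, getLastD_irrel d xs x 0] using this
    · simp only [pairLoop, stepPair, runsAux, if_neg hx]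
      have hstate : (if cc > mc then ((cc : Int), (1 : Int), some d) else (mc, 1, md))
          = ((bestStep (mc, md) (d, cc)).1, (1 : Int), (bestStep (mc, md) (d, cc)).2) := by
        simp only [bestStep]
        by_cases h : cc > mc <;> simp [h]
      have := ih x (bestStep (mc, md) (d, cc)).1 1 (bestStep (mc, md) (d, cc)).2
      simp only [List.foldl_cons]
      rw [List.getLastD_cons, getLastD_irrel x xs d 0, hstate]
      exact this

-- ===== VERDICT (by name: the statement is the Claim_ definition above) =====
theorem f_spec : Claim_equal_f := by
  intro dice _hdom hpre
  unfold Spec_f f f_alt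
  obtain ⟨x, rest, rfl⟩ : ∃ y ys, dice = y :: ys := by
    cases dice with
    | nil => exact absurd rfl hpre
    | cons y ys => exact ⟨y, ys, rfl⟩
  have hA := suffixA rest.length (x :: rest) 1 (0, 1, none) le_rfl
    (by simp only [List.length_cons]; omega)
  simp only [Nat.cast_one, Nat.sub_self, List.getD_cons_zero, List.drop_one,
    List.tail_cons] at hA
  have hlast : PySem.List.pyGetD (x :: rest) (-1) 0 = (x :: rest).getLastD 0 := by
    rw [PySem.List.pyGetD_neg_one (x :: rest) 0 hpre, List.getLastD_eq_getLast?,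
        List.getLast?_eq_some_getLast hpre]
    rfl
  have hB : (x :: rest).foldl addToRuns [] = runsAux x 1 rest := by
    have h0 : addToRuns [] x = [] ++ [(x, 1)] := by simp [addToRuns]
    simp only [List.foldl_cons, h0]
    simpa using foldl_addToRuns rest [] x 1
  simp only [hA, hlast, hB]
  exact congrArg (Option.getD · 0) (mainLemma rest x 0 1 none)
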